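-- pv_equiv track=rewrite | github.com/JackVey/Data-Structure-Library-1402 | Session 4 - Binary Stable Sort/Answers/Navid/radixSort.py | StableRBA
-- ===== SOURCE A (Python) =====
-- def BlockSwap(A, p, q):
--     for i in range(0, q-p):
--         (A[p+i], A[q+i]) = (A[q+i], A[p+i])
--
-- def StableRBA(A, p, q, r):
--     n0 = r-q
--     n1 = q-p
--     if n1 == 0:
--         return r
--     while n0 > 0:
--         if n1 > n0:
--             p = q-n0
--             BlockSwap(A, p, q)
--             n1 = n1-n0
--             q = p
--             p = p-n1
--         else:
--             BlockSwap(A, p, q)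
--             n0 = n0-n1
--             p = q
--             q = q+n1
--     return p
-- ===== SOURCE B (Python) =====
-- def _reverse(A, i, j):
--     # reverse A[i:j] in place with two pointers
--     j -= 1
--     while i < j:
--         A[i], A[j] = A[j], A[i]
--         i += 1
--         j -= 1
--
-- def StableRBA(A, p, q, r):
--     n1 = q - p
--     n0 = r - q
--     if n1 == 0:
--         return r
--     if n0 <= 0:
--         return p
--     _reverse(A, p, q)
--     _reverse(A, q, r)
--     _reverse(A, p, r)
--     return p + n0
-- ===== Notes on version B (the rewrite author's own statement) =====
-- stated objective: simpler
-- what changed: Replaced A's iterated GCD-style block-swap rotation loop with the standard three-reversal rotation (reverse A[p:q], A[q:r], A[p:r] via a two-pointer in-place helper) and a closed-form return value (r if q==p, p if r<=q, else p+(r-q)).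
-- outside the precondition, e.g. on StableRBA([0, 1, 2], -3, 1, 3): A returns -1, B returns -1; on StableRBA([0, 1], 0, 1, 3): A raises IndexError, B raises IndexError; on StableRBA([0, 1, 2], 2, 0, 3): A does not finish within the time limit, B returns 5
import Mathlib
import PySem

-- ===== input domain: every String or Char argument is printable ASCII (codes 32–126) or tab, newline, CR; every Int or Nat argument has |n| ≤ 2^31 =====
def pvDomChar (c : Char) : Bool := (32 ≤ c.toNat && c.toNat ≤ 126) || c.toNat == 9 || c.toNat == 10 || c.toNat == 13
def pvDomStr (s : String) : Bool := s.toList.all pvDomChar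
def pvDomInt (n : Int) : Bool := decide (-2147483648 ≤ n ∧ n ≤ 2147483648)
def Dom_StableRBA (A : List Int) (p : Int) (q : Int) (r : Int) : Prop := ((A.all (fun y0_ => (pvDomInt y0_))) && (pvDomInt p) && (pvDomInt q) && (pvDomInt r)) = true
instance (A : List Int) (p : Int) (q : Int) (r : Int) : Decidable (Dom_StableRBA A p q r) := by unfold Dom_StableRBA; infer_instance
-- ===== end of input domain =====

-- B replaces A's iterated block-swap rotation loop with a closed-form three-reversal rotation
-- (simpler; same O(r-p) in-place mutation). Both versions mutate A in place; the equivalence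
-- proved here is about the RETURN value (the Int-returning ports cannot carry the mutation).


-- ===== PORT A =====
-- Python's `while n0 > 0` loop; BlockSwap only mutates A (no effect on the returned index),
-- so its swaps are not re-modelled here. The `0 < n1` guard only makes the function total:
-- when n1 ≤ 0 < n0 the Python loop never terminates (outside Pre_).
def StableRBA.loop (A : List Int) (p : Int) (q : Int) (n0 : Int) (n1 : Int) : Int :=
  if h0 : 0 < n0 then
    if h1 : 0 < n1 then
      if n1 > n0 then
        -- p = q-n0; BlockSwap(A,p,q); n1 = n1-n0; q = p; p = p-n1
        StableRBA.loop A ((q - n0) - (n1 - n0)) (q - n0) n0 (n1 - n0)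
      else
        -- BlockSwap(A,p,q); n0 = n0-n1; p = q; q = q+n1
        StableRBA.loop A q (q + n1) (n0 - n1) n1
    else p
  else p
termination_by (n0 + n1).toNat
decreasing_by
  · omega
  · omega

def StableRBA (A : List Int) (p : Int) (q : Int) (r : Int) : Int :=
  let n0 := r - q
  let n1 := q - p
  if n1 = 0 then r
  else StableRBA.loop A p q n0 n1

-- ===== PORT B =====
-- Source B's three in-place reversals only mutate A; the returned index is p + n0.
def StableRBA_alt (A : List Int) (p : Int) (q : Int) (r : Int) : Int :=
  let n1 := q - p
  let n0 := r - q
  if n1 = 0 then r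
  else if n0 ≤ 0 then p
  else p + n0

-- ===== PRECONDITION & SPEC =====
-- Pre_ excludes non-degenerate calls (both blocks non-empty) whose index range leaves
-- [0, len(A)]: there Python's BlockSwap either raises IndexError or mutates A through
-- accidental negative-index wraparound; A's returned index there is an artefact of that
-- accident (B happens to return the same index, but leaves A in a different state).
-- It also excludes q < p with q < r, where A's while-loop never terminates.
def Pre_StableRBA (A : List Int) (p : Int) (q : Int) (r : Int) : Prop :=
  q = p ∨ r ≤ q ∨ (p < q ∧ q < r ∧ 0 ≤ p ∧ r ≤ (A.length : Int))
instance (A : List Int) (p : Int) (q : Int) (r : Int) : Decidable (Pre_StableRBA A p q r) := by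
  unfold Pre_StableRBA; infer_instance

def pvWitness_StableRBA : List Int × Int × Int × Int := ([5, 1, 4, 2], 0, 1, 3)

def Spec_StableRBA (A : List Int) (p : Int) (q : Int) (r : Int) (out : Int) : Prop := out = StableRBA_alt A p q r
instance (A : List Int) (p : Int) (q : Int) (r : Int) (out : Int) : Decidable (Spec_StableRBA A p q r out) := by unfold Spec_StableRBA; infer_instance

-- ===== CLAIM (what is proved, stated in full; the proofs are below) =====
def Claim_equal_StableRBA : Prop := ∀ (A : List Int) (p : Int) (q : Int) (r : Int), Dom_StableRBA A p q r → Pre_StableRBA A p q r → Spec_StableRBA A p q r (StableRBA A p q r)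

-- ===== LEMMAS AND PROOFS =====

-- Loop invariant: with both counters positive and n1 = q - p, the loop returns p + n0.
lemma StableRBA_loop_eq (n : ℕ) : ∀ (A : List Int) (p q n0 n1 : Int),
    (n0 + n1).toNat ≤ n → 0 < n0 → 0 < n1 → n1 = q - p →
    StableRBA.loop A p q n0 n1 = p + n0 := by
  induction n with
  | zero => intro A p q n0 n1 hle h0 h1 _; omega
  | succ n ih =>
    intro A p q n0 n1 hle h0 h1 hq
    rw [StableRBA.loop, dif_pos h0, dif_pos h1]
    split_ifs with hgt
    · rw [ih A ((q - n0) - (n1 - n0)) (q - n0) n0 (n1 - n0) (by omega) h0 (by omega) (by omega)]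
      omega
    · by_cases hz : 0 < n0 - n1
      · rw [ih A q (q + n1) (n0 - n1) n1 (by omega) hz h1 (by omega)]
        omega
      · rw [StableRBA.loop, dif_neg (by omega)]
        omega

lemma StableRBA_loop_nonpos (A : List Int) (p q n0 n1 : Int) (h : ¬ 0 < n0) :
    StableRBA.loop A p q n0 n1 = p := by
  rw [StableRBA.loop, dif_neg h]

-- ===== VERDICT (by name: the statement is the Claim_ definition above) =====
theorem StableRBA_spec : Claim_equal_StableRBA := by
  intro A p q r _ hpre
  unfold Spec_StableRBA StableRBA StableRBA_alt
  rcases hpre with h | h | ⟨h1, h2, _, _⟩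
  · simp [h]
  · by_cases hq : q - p = 0
    · simp [hq]
    · rw [if_neg hq, if_neg hq, if_pos (by omega : r - q ≤ 0),
        StableRBA_loop_nonpos A p q (r - q) (q - p) (by omega)]
  · rw [if_neg (by omega), if_neg (by omega), if_neg (by omega),
      StableRBA_loop_eq (r - q + (q - p)).toNat A p q (r - q) (q - p) le_rfl
        (by omega) (by omega) rfl]
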